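-- pv_equiv track=rewrite | github.com/Jasonmony/CS440_UIUC_Fall2021 | MP1/search.py | h_multiple
-- ===== SOURCE A (Python) =====
-- class MST:
--     def __init__(self, objectives):
--         self.elements = {key: None for key in objectives}
--
--         # TODO: implement some distance between two objectives
--         # ... either compute the shortest path between them, or just use the manhattan distance between the objectives
--         def DISTANCE(point1, point2):
--             return abs(point1[0]-point2[0])+abs(point1[1]-point2[1])
--         self.distances   = {
--                 (i, j): DISTANCE(i, j)
--                 for i, j in self.cross(objectives)
--             }
--
--     # Prim's algorithm adds edges to the MST in sorted order as long as they don't create a cycle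
--     def compute_mst_weight(self):
--         weight      = 0
--         for distance, i, j in sorted((self.distances[(i, j)], i, j) for (i, j) in self.distances):
--             if self.unify(i, j):
--                 weight += distance
--         return weight
--
--     # helper checks the root of a node, in the process flatten the path to the root
--     def resolve(self, key):
--         path = []
--         root = key
--         while self.elements[root] is not None:
--             path.append(root)
--             root = self.elements[root]
--         for key in path:
--             self.elements[key] = root
--         return root
--
--     # helper checks if the two elements have the same root they are part of the same tree
--     # otherwise set the root of one to the other, connecting the trees
--     def unify(self, a, b):
--         ra = self.resolve(a)
--         rb = self.resolve(b)
--         if ra == rb: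
--             return False
--         else:
--             self.elements[rb] = ra
--             return True
--
--     # helper that gets all pairs i,j for a list of keys
--     def cross(self, keys):
--         return (x for y in (((i, j) for j in keys if i < j) for i in keys) for x in y)
--
-- def h_single(point1, point2):
--
--     return abs(point1[0]-point2[0])+abs(point1[1]-point2[1])
--
-- def h_multiple(current_pos, remaining_goals):
--
--     closest_goal = None
--     dis = 99999
--     for goal in remaining_goals:
--         if h_single(goal,current_pos) < dis:
--             closest_goal = goal
--             dis =  h_single(goal,current_pos)
--     mst = MST(remaining_goals)
--     h_total = dis + mst.compute_mst_weight()
--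
--     return h_total
-- ===== SOURCE B (Python) =====
-- def h_multiple(current_pos, remaining_goals):
--     dis = min([99999] + [abs(g[0] - current_pos[0]) + abs(g[1] - current_pos[1]) for g in remaining_goals])
--     vs = sorted(set(remaining_goals))
--     edges = sorted((abs(vs[x][0] - vs[y][0]) + abs(vs[x][1] - vs[y][1]), vs[x], vs[y])
--                    for x in range(len(vs)) for y in range(x + 1, len(vs)))
--     comp = {v: v for v in vs}
--     weight = 0
--     for d, i, j in edges:
--         ri, rj = comp[i], comp[j]
--         if ri != rj:
--             weight += d
--             comp = {v: (ri if r == rj else r) for v, r in comp.items()}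
--     return dis + weight
-- ===== Notes on version B (the rewrite author's own statement) =====
-- stated objective: simpler
-- what changed: B keeps Kruskal's sorted-edge order but drops A's MST class entirely: no union-find with path compression and no pair-keyed distance dict - vertices are the sorted deduplicated goal list, edges come from an index-pair comprehension over it, connectivity is a plain vertex-to-representative dict rebuilt on each accepted edge, and the nearest-goal distance is builtin min() instead of a tracking loop.
import Mathlib
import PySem

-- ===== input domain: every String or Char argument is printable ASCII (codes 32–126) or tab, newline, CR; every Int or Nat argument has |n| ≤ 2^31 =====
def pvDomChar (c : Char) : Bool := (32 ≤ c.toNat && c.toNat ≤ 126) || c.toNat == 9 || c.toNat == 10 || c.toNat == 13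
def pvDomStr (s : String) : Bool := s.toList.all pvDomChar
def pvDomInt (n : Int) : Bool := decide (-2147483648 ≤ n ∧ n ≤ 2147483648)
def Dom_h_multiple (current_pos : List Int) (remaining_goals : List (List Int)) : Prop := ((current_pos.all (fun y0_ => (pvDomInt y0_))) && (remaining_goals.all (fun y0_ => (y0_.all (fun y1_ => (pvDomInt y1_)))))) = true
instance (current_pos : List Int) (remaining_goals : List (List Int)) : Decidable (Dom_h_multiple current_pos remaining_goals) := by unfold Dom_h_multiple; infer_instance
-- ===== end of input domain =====

-- B replaces A's Kruskal-with-path-compressing-union-find by a Kruskal over the deduplicated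
-- sorted vertex list whose components are kept in a plain vertex→representative map (rebuilt on
-- each accepted edge), and computes the nearest-goal distance with builtin min(); objective:
-- simpler (no MST class, no union-find).  Python's tuple comparison on the triples (d, i, j) is
-- ported exactly as the order-isomorphic key [[d], i, j] under List lexicographic order.

-- ===== PORT A =====
-- A-side helpers: h_single, MST.DISTANCE, MST.cross, the two dicts of MST.__init__,
-- MST.resolve (its while loop fuel-bounded by d.size, which is proved sufficient below),
-- MST.unify and MST.compute_mst_weight.
def pvHSingle (point1 point2 : List Int) : Int :=
  |PySem.List.pyGetD point1 0 0 - PySem.List.pyGetD point2 0 0| +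
    |PySem.List.pyGetD point1 1 0 - PySem.List.pyGetD point2 1 0|

def pvDISTANCE (point1 point2 : List Int) : Int :=
  |PySem.List.pyGetD point1 0 0 - PySem.List.pyGetD point2 0 0| +
    |PySem.List.pyGetD point1 1 0 - PySem.List.pyGetD point2 1 0|

def pvCross (keys : List (List Int)) : List (List Int × List Int) :=
  keys.flatMap (fun i => (keys.filter (fun j => decide (i < j))).map (fun j => (i, j)))

def pvElems0 (objectives : List (List Int)) : PySem.Dict (List Int) (Option (List Int)) :=
  objectives.foldl (fun d k => d.insert k none) PySem.Dict.empty

def pvDistances (objectives : List (List Int)) : PySem.Dict (List Int × List Int) Int :=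
  (pvCross objectives).foldl (fun d p => d.insert p (pvDISTANCE p.1 p.2)) PySem.Dict.empty

-- 'while self.elements[root] is not None: path.append(root); root = self.elements[root]'
def pvResolveLoop : Nat → PySem.Dict (List Int) (Option (List Int)) → List (List Int) → List Int →
    List (List Int) × List Int
  | 0, _, path, root => (path, root)
  | fuel + 1, d, path, root =>
    match d.get? root with
    | some (some p) => pvResolveLoop fuel d (path ++ [root]) p
    | _ => (path, root)

def pvResolve (d : PySem.Dict (List Int) (Option (List Int))) (key : List Int) :
    List Int × PySem.Dict (List Int) (Option (List Int)) :=
  let pr := pvResolveLoop (PySem.Dict.size d) d [] key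
  (pr.2, pr.1.foldl (fun e k => e.insert k (some pr.2)) d)

def pvUnify (d : PySem.Dict (List Int) (Option (List Int))) (a b : List Int) :
    Bool × PySem.Dict (List Int) (Option (List Int)) :=
  let ra := pvResolve d a
  let rb := pvResolve ra.2 b
  if ra.1 = rb.1 then (false, rb.2) else (true, rb.2.insert rb.1 (some ra.1))

-- Python's tuple order on (d, i, j) as an order-isomorphic sort key (used by both ports)
def pvKey3 (t : Int × List Int × List Int) : List (List Int) := [[t.1], t.2.1, t.2.2]

def pvMstWeight (objectives : List (List Int)) : Int :=
  ((PySem.List.sorted ((pvDistances objectives).items.map (fun kv => (kv.2, kv.1.1, kv.1.2))) pvKey3).foldl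
    (fun (st : Int × PySem.Dict (List Int) (Option (List Int))) t =>
      let u := pvUnify st.2 t.2.1 t.2.2
      (if u.1 then st.1 + t.1 else st.1, u.2))
    (0, pvElems0 objectives)).1

def h_multiple (current_pos : List Int) (remaining_goals : List (List Int)) : Int :=
  let dis := remaining_goals.foldl
    (fun dis goal => if pvHSingle goal current_pos < dis then pvHSingle goal current_pos else dis)
    99999
  dis + pvMstWeight remaining_goals

-- ===== PORT B =====
-- B-side helpers: the manhattan distance, Source B's index-pair edge comprehension, the component-map
-- rebuild of its dict comprehension, and its loop body.
def pvBDist (p q : List Int) : Int :=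
  |PySem.List.pyGetD p 0 0 - PySem.List.pyGetD q 0 0| +
    |PySem.List.pyGetD p 1 0 - PySem.List.pyGetD q 1 0|

def pvTB (vs : List (List Int)) : List (Int × List Int × List Int) :=
  (PySem.List.pyRange 0 vs.length 1).flatMap (fun x =>
    (PySem.List.pyRange (x + 1) vs.length 1).map (fun y =>
      (pvBDist (PySem.List.pyGetD vs x []) (PySem.List.pyGetD vs y []),
        PySem.List.pyGetD vs x [], PySem.List.pyGetD vs y [])))

def pvBMerge (comp : PySem.Dict (List Int) (List Int)) (ri rj : List Int) :
    PySem.Dict (List Int) (List Int) :=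
  comp.items.foldl (fun d vr => d.insert vr.1 (if vr.2 = rj then ri else vr.2)) PySem.Dict.empty

def pvBStep (st : Int × PySem.Dict (List Int) (List Int)) (t : Int × List Int × List Int) :
    Int × PySem.Dict (List Int) (List Int) :=
  let ri := st.2.getD t.2.1 []
  let rj := st.2.getD t.2.2 []
  if ri ≠ rj then (st.1 + t.1, pvBMerge st.2 ri rj) else st

def h_multiple_alt (current_pos : List Int) (remaining_goals : List (List Int)) : Int :=
  let dis := (PySem.List.min?
      ((99999 : Int) :: remaining_goals.map (fun g => pvBDist g current_pos)) (fun x => x)).getD 99999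
  let vs := PySem.List.sorted (PySem.Set.ofList remaining_goals) (fun x => x)
  let edges := PySem.List.sorted (pvTB vs) pvKey3
  let comp0 := vs.foldl (fun d v => d.insert v v) PySem.Dict.empty
  dis + (edges.foldl pvBStep (0, comp0)).1

-- ===== PRECONDITION & SPEC =====
-- Pre_ excludes exactly the inputs on which the Python A raises IndexError: a nonempty goal
-- list together with a current position or a goal of fewer than 2 coordinates.
def Pre_h_multiple (current_pos : List Int) (remaining_goals : List (List Int)) : Prop :=
  remaining_goals = [] ∨ (2 ≤ current_pos.length ∧ ∀ g ∈ remaining_goals, 2 ≤ g.length)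
instance (current_pos : List Int) (remaining_goals : List (List Int)) : Decidable (Pre_h_multiple current_pos remaining_goals) := by unfold Pre_h_multiple; infer_instance

def pvWitness_h_multiple : List Int × List (List Int) := ([0, 0], [[1, 2], [3, 4], [1, 2]])

def Spec_h_multiple (current_pos : List Int) (remaining_goals : List (List Int)) (out : Int) : Prop := out = h_multiple_alt current_pos remaining_goals
instance (current_pos : List Int) (remaining_goals : List (List Int)) (out : Int) : Decidable (Spec_h_multiple current_pos remaining_goals out) := by unfold Spec_h_multiple; infer_instance

-- ===== CLAIM (what is proved, stated in full; the proofs are below) =====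
def Claim_equal_h_multiple : Prop := ∀ (current_pos : List Int) (remaining_goals : List (List Int)), Dom_h_multiple current_pos remaining_goals → Pre_h_multiple current_pos remaining_goals → Spec_h_multiple current_pos remaining_goals (h_multiple current_pos remaining_goals)

-- ===== LEMMAS AND PROOFS =====
inductive PvChain (d : PySem.Dict (List Int) (Option (List Int))) : List Int → List (List Int) → Prop
  | root {k : List Int} : d.get? k = some none → PvChain d k []
  | step {k p : List Int} {ch : List (List Int)} :
      d.get? k = some (some p) → PvChain d p ch → PvChain d k (p :: ch)

def PvRoot (d : PySem.Dict (List Int) (Option (List Int))) (k r : List Int) : Prop :=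
  ∃ ch, PvChain d k ch ∧ ch.getLastD k = r

theorem pvChain_unique {d k ch ch'} (h : PvChain d k ch) (h' : PvChain d k ch') : ch = ch' := by
  induction h generalizing ch' with
  | root hk => cases h' with
    | root => rfl
    | step hk' _ => rw [hk] at hk'; cases hk'
  | step hk hp ih => cases h' with
    | root hk' => rw [hk] at hk'; cases hk'
    | step hk' hp' =>
      rw [hk] at hk'
      injection hk' with e; injection e with e
      subst e
      rw [ih hp']

theorem pvChain_mem_keys {d k ch} (h : PvChain d k ch) : k ∈ d.keys ∧ ∀ x ∈ ch, x ∈ d.keys := by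
  have memk : ∀ (k' : List Int) (v : Option (List Int)), d.get? k' = some v → k' ∈ d.keys := by
    intro k' v hv
    by_contra hmem
    rw [(PySem.Dict.get?_eq_none_iff_not_mem_keys d k').mpr hmem] at hv
    cases hv
  induction h with
  | root hk => exact ⟨memk _ _ hk, by simp⟩
  | step hk hp ih =>
    refine ⟨memk _ _ hk, ?_⟩
    intro x hx
    rcases List.mem_cons.mp hx with rfl | hx'
    · exact ih.1
    · exact ih.2 x hx' 

theorem pvChain_drop {d k ch} (h : PvChain d k ch) {x} (hx : x ∈ ch) :
    ∃ ch', PvChain d x ch' ∧ ch'.length < ch.length ∧ ch'.getLastD x = ch.getLastD k := by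
  induction h with
  | root hk => simp at hx
  | step hk hp ih =>
    rename_i k' p ch'
    rcases List.mem_cons.mp hx with rfl | hx'
    · exact ⟨ch', hp, by simp, by rw [List.getLastD_cons]⟩
    · obtain ⟨c2, hc2, hl, hlast⟩ := ih hx'
      refine ⟨c2, hc2, by simp; omega, ?_⟩
      rw [hlast, List.getLastD_cons]

theorem pvChain_nodup {d k ch} (h : PvChain d k ch) : (k :: ch).Nodup := by
  induction h with
  | root hk => simp
  | step hk hp ih =>
    rename_i k' p ch'
    refine List.nodup_cons.mpr ⟨?_, ih⟩
    intro hmem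
    obtain ⟨c2, hc2, hl, _⟩ := pvChain_drop (PvChain.step hk hp) hmem
    have := pvChain_unique (PvChain.step hk hp) hc2
    subst this; omega

theorem pvChain_root_isRoot {d k ch} (h : PvChain d k ch) : d.get? (ch.getLastD k) = some none := by
  induction h with
  | root hk => simpa using hk
  | step hk hp ih => rw [List.getLastD_cons]; exact ih

theorem pvRoot_unique {d k r r'} (h : PvRoot d k r) (h' : PvRoot d k r') : r = r' := by
  obtain ⟨ch, hc, hr⟩ := h; obtain ⟨ch', hc', hr'⟩ := h'
  cases pvChain_unique hc hc'
  rw [← hr, ← hr']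

theorem pvResolveLoop_eq {d k ch} (h : PvChain d k ch) :
    ∀ fuel path, ch.length < fuel →
      pvResolveLoop fuel d path k = (path ++ (k :: ch).dropLast, ch.getLastD k) := by
  induction h with
  | root hk =>
    intro fuel path hf
    match fuel, hf with
    | f + 1, _ => simp [pvResolveLoop, hk]
  | step hk hp ih =>
    rename_i k' p ch'
    intro fuel path hf
    match fuel, hf with
    | f + 1, hf =>
      have hlen : ch'.length < f := by simp at hf; omega
      simp only [pvResolveLoop, hk]
      rw [ih f (path ++ [k']) hlen, List.getLastD_cons]
      cases ch' with
      | nil => simp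
      | cons a t => simp

theorem pvGet_foldl_insertf {κ ν : Type} [BEq κ] [LawfulBEq κ] [DecidableEq κ]
    (f : κ → ν) (l : List κ) (d : PySem.Dict κ ν) (y : κ) :
    (l.foldl (fun e x => e.insert x (f x)) d).get? y = if y ∈ l then some (f y) else d.get? y := by
  induction l generalizing d with
  | nil => simp
  | cons x t ih =>
    simp only [List.foldl_cons, ih, PySem.Dict.get?_insert, List.mem_cons]
    by_cases h1 : y ∈ t <;> by_cases h2 : y = x <;> simp [h1, h2]

theorem pvSet_update_of_subset (s : List (List Int)) (l : List (List Int)) (h : ∀ x ∈ l, x ∈ s) :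
    PySem.Set.update s l = s := by
  induction l generalizing s with
  | nil => rfl
  | cons x t ih =>
    have hx : x ∈ s := h x (by simp)
    have : PySem.Set.add s x = s := by
      simp [PySem.Set.add, PySem.Set.contains, hx]
    rw [show PySem.Set.update s (x :: t) = PySem.Set.update (PySem.Set.add s x) t from rfl, this]
    exact ih s (fun y hy => h y (by simp [hy]))

-- keys of a fold of inserts over keys already present
theorem pvKeys_foldl_insertf {ν : Type} (f : List Int → ν) (l : List (List Int))
    (d : PySem.Dict (List Int) ν) (h : ∀ x ∈ l, x ∈ d.keys) :
    (l.foldl (fun e x => e.insert x (f x)) d).keys = d.keys := by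
  rw [PySem.Dict.keys_foldl_insert]
  exact pvSet_update_of_subset _ _ h

theorem pvLast_eq {k : List Int} {ch : List (List Int)} (h : k :: ch ≠ []) :
    ch.getLastD k = (k :: ch).getLast h := by
  cases ch with
  | nil => simp
  | cons a t => simp [List.getLastD_eq_getLast?, List.getLast?_eq_some_getLast (l := a :: t) (by simp)]

theorem pvCompress_root {d : PySem.Dict (List Int) (Option (List Int))} {k : List Int}
    {ch : List (List Int)} (h : PvChain d k ch) {x : List Int} {chx : List (List Int)}
    (hx : PvChain d x chx) :
    PvRoot ((k :: ch).dropLast.foldl (fun e y => e.insert y (some (ch.getLastD k))) d) x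
      (chx.getLastD x) := by
  set r := ch.getLastD k with hr
  set P := (k :: ch).dropLast with hP
  set d' := P.foldl (fun e y => e.insert y (some r)) d with hd'
  have hget' : ∀ y, d'.get? y = if y ∈ P then some (some r) else d.get? y := by
    intro y; rw [hd']; exact pvGet_foldl_insertf (fun _ => some r) P d y
  have hrP : r ∉ P := by
    have hnd := pvChain_nodup h
    have hsplit : P ++ [(k :: ch).getLast (by simp)] = k :: ch :=
      List.dropLast_append_getLast (by simp)
    rw [← pvLast_eq] at hsplit
    rw [← hsplit] at hnd
    have := List.nodup_append.mp hnd
    intro hmem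
    exact this.2.2 r hmem (ch.getLastD k) (by simp) hr
  have hroot : d'.get? r = some none := by
    rw [hget' r, if_neg hrP]
    exact pvChain_root_isRoot h
  have hchainroot : ∀ y ∈ k :: ch, PvRoot d y r := by
    intro y hy
    rcases List.mem_cons.mp hy with rfl | hy'
    · exact ⟨ch, h, rfl⟩
    · obtain ⟨c2, hc2, _, hlast⟩ := pvChain_drop h hy'
      exact ⟨c2, hc2, hlast⟩
  have hPmem : ∀ y ∈ P, y ∈ k :: ch := fun y hy => List.dropLast_subset _ hy
  induction hx with
  | root hx0 =>
    rename_i x0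
    by_cases hxP : x0 ∈ P
    · exfalso
      have h1 : PvRoot d x0 r := hchainroot x0 (hPmem x0 hxP)
      have h2 : PvRoot d x0 x0 := ⟨[], PvChain.root hx0, rfl⟩
      have := pvRoot_unique h1 h2
      subst this; exact hrP hxP
    · refine ⟨[], PvChain.root ?_, rfl⟩
      rw [hget' x0, if_neg hxP]; exact hx0
  | step hx0 hp ih =>
    rename_i x0 p chp
    by_cases hxP : x0 ∈ P
    · have h1 : PvRoot d x0 r := hchainroot x0 (hPmem x0 hxP)
      have h2 : PvRoot d x0 ((p :: chp).getLastD x0) := ⟨p :: chp, PvChain.step hx0 hp, rfl⟩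
      have heq : (p :: chp).getLastD x0 = r := pvRoot_unique h2 h1
      rw [heq]
      refine ⟨[r], PvChain.step ?_ (PvChain.root hroot), by simp⟩
      rw [hget' x0, if_pos hxP]
    · obtain ⟨t', ht', hlast'⟩ := ih
      refine ⟨p :: t', PvChain.step ?_ ht', ?_⟩
      · rw [hget' x0, if_neg hxP]; exact hx0
      · rw [List.getLastD_cons, hlast', List.getLastD_cons]

def PvGood (d : PySem.Dict (List Int) (Option (List Int))) : Prop :=
  ∀ k ∈ d.keys, ∃ ch, PvChain d k ch

theorem pvKeys_length (d : PySem.Dict (List Int) (Option (List Int))) :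
    d.keys.length = PySem.Dict.size d := by
  simp [PySem.Dict.keys, PySem.Dict.size]

theorem pvResolve_spec {d k} (hg : PvGood d) (hk : k ∈ d.keys) :
    ∃ r, PvRoot d k r ∧ (pvResolve d k).1 = r ∧
      (∀ x rx, PvRoot d x rx → PvRoot (pvResolve d k).2 x rx) ∧
      (pvResolve d k).2.keys = d.keys := by
  obtain ⟨ch, hch⟩ := hg k hk
  have hmem := pvChain_mem_keys hch
  have hsub : (k :: ch) ⊆ d.keys := by
    intro y hy
    rcases List.mem_cons.mp hy with rfl | hy'
    · exact hmem.1
    · exact hmem.2 y hy'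
  have hlen : (k :: ch).length ≤ d.keys.length := ((pvChain_nodup hch).subperm hsub).length_le
  have hfuel : ch.length < PySem.Dict.size d := by
    rw [← pvKeys_length]; simp at hlen; omega
  have hloop := pvResolveLoop_eq hch (PySem.Dict.size d) [] hfuel
  refine ⟨ch.getLastD k, ⟨ch, hch, rfl⟩, ?_, ?_, ?_⟩
  · simp [pvResolve, hloop]
  · intro x rx hrx
    obtain ⟨chx, hchx, hlx⟩ := hrx
    have := pvCompress_root hch hchx
    rw [hlx] at this
    simpa [pvResolve, hloop] using this
  · have : (pvResolve d k).2 =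
        (k :: ch).dropLast.foldl (fun e y => e.insert y (some (ch.getLastD k))) d := by
      simp [pvResolve, hloop]
    rw [this]
    exact pvKeys_foldl_insertf _ _ d (fun x hx => hsub (List.dropLast_subset _ hx))

theorem pvUnion_root {d2 : PySem.Dict (List Int) (Option (List Int))} {ra rb : List Int}
    (hra : d2.get? ra = some none) (hrb : d2.get? rb = some none)
    (hne : ra ≠ rb) {x rx} (h : PvRoot d2 x rx) :
    PvRoot (d2.insert rb (some ra)) x (if rx = rb then ra else rx) := by
  obtain ⟨ch, hch, hlast⟩ := h
  have hgetra : (d2.insert rb (some ra)).get? ra = some none := by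
    rw [PySem.Dict.get?_insert, if_neg hne]; exact hra
  induction hch generalizing rx with
  | root hx0 =>
    rename_i x0
    simp only [List.getLastD] at hlast
    subst hlast
    by_cases hx : x0 = rb
    · subst hx
      rw [if_pos rfl]
      refine ⟨[ra], PvChain.step ?_ (PvChain.root hgetra), by simp⟩
      rw [PySem.Dict.get?_insert, if_pos rfl]
    · rw [if_neg hx]
      refine ⟨[], PvChain.root ?_, rfl⟩
      rw [PySem.Dict.get?_insert, if_neg hx]; exact hx0
  | step hx0 hp ih =>
    rename_i x0 p chp
    have hxne : x0 ≠ rb := by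
      intro hx; subst hx; rw [hrb] at hx0; cases hx0
    rw [List.getLastD_cons] at hlast
    obtain ⟨t', ht', hlt'⟩ := ih hlast
    refine ⟨p :: t', PvChain.step ?_ ht', ?_⟩
    · rw [PySem.Dict.get?_insert, if_neg hxne]; exact hx0
    · rw [List.getLastD_cons, hlt']

theorem pvRoot_isRoot {d : PySem.Dict (List Int) (Option (List Int))} {x r : List Int}
    (h : PvRoot d x r) : d.get? r = some none := by
  obtain ⟨ch, hch, hlast⟩ := h
  rw [← hlast]; exact pvChain_root_isRoot hch

theorem pvGood_of_pres {d d' : PySem.Dict (List Int) (Option (List Int))}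
    (hpres : ∀ x rx, PvRoot d x rx → PvRoot d' x rx) (hkeys : d'.keys = d.keys)
    (hg : PvGood d) : PvGood d' := by
  intro k hk
  rw [hkeys] at hk
  obtain ⟨ch, hch⟩ := hg k hk
  obtain ⟨ch', hch', _⟩ := hpres k (ch.getLastD k) ⟨ch, hch, rfl⟩
  exact ⟨ch', hch'⟩

theorem pvUnify_spec {d : PySem.Dict (List Int) (Option (List Int))} {a b ra rb : List Int}
    (hg : PvGood d) (ha : a ∈ d.keys) (hb : b ∈ d.keys)
    (hra : PvRoot d a ra) (hrb : PvRoot d b rb) :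
    (pvUnify d a b).1 = decide (ra ≠ rb) ∧
      PvGood (pvUnify d a b).2 ∧ (pvUnify d a b).2.keys = d.keys ∧
      (∀ x rx, PvRoot d x rx → PvRoot (pvUnify d a b).2 x (if ra ≠ rb ∧ rx = rb then ra else rx)) := by
  obtain ⟨ra', hra', hval, hpres, hkeys⟩ := pvResolve_spec hg ha
  rw [pvRoot_unique hra' hra] at hval
  replace hra' := hra
  set d1 := (pvResolve d a).2 with hd1
  have hg1 : PvGood d1 := pvGood_of_pres hpres hkeys hg
  have hb1 : b ∈ d1.keys := by rw [hkeys]; exact hb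
  obtain ⟨rb', hrb', hval2, hpres2, hkeys2⟩ := pvResolve_spec hg1 hb1
  rw [pvRoot_unique hrb' (hpres b rb hrb)] at hval2
  replace hrb' := hrb
  set d2 := (pvResolve d1 b).2 with hd2
  have hg2 : PvGood d2 := pvGood_of_pres hpres2 hkeys2 hg1
  have hpres12 : ∀ x rx, PvRoot d x rx → PvRoot d2 x rx := fun x rx h =>
    hpres2 x rx (hpres x rx h)
  have hkeys12 : d2.keys = d.keys := hkeys2.trans hkeys
  have hunf : pvUnify d a b =
      (if ra = rb then (false, d2) else (true, d2.insert rb (some ra))) := by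
    rw [pvUnify]
    simp only [← hd1, ← hd2, hval, hval2]
  by_cases hc : ra = rb
  · subst hc
    rw [hunf, if_pos rfl]
    refine ⟨by simp, hg2, hkeys12, ?_⟩
    intro x rx h
    simpa using hpres12 x rx h
  · rw [hunf, if_neg hc]
    have hraroot : d2.get? ra = some none := pvRoot_isRoot (hpres12 a ra hra)
    have hrbroot : d2.get? rb = some none := pvRoot_isRoot (hpres12 b rb hrb)
    have hrbmem : rb ∈ d2.keys := by
      by_contra hmem
      rw [(PySem.Dict.get?_eq_none_iff_not_mem_keys d2 rb).mpr hmem] at hrbroot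
      cases hrbroot
    have hkeyseq : (d2.insert rb (some ra)).keys = d2.keys :=
      PySem.Dict.keys_insert_of_contains d2 (some ra) ((PySem.Dict.contains_iff_mem_keys d2 rb).mpr hrbmem)
    have hpresU : ∀ x rx, PvRoot d x rx →
        PvRoot (d2.insert rb (some ra)) x (if rx = rb then ra else rx) := fun x rx h =>
      pvUnion_root hraroot hrbroot hc (hpres12 x rx h)
    refine ⟨by simp [hc], ?_, hkeyseq.trans hkeys12, ?_⟩
    · intro k hkmem
      rw [hkeyseq, hkeys12] at hkmem
      obtain ⟨ch, hch⟩ := hg k hkmem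
      obtain ⟨ch', hch', _⟩ := hpresU k (ch.getLastD k) ⟨ch, hch, rfl⟩
      exact ⟨ch', hch'⟩
    · intro x rx h
      have := hpresU x rx h
      simpa [hc] using this

theorem pvBMerge_get? {comp : PySem.Dict (List Int) (List Int)} (hnd : comp.keys.Nodup)
    (ri rj y : List Int) :
    (pvBMerge comp ri rj).get? y =
      if y ∈ comp.keys then some (if comp.getD y [] = rj then ri else comp.getD y []) else none := by
  rw [pvBMerge, PySem.Dict.items_eq_map_keys comp hnd [], List.foldl_map]
  have := pvGet_foldl_insertf (fun k => if comp.getD k [] = rj then ri else comp.getD k [])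
      comp.keys PySem.Dict.empty y
  simpa using this

theorem pvBMerge_keys {comp : PySem.Dict (List Int) (List Int)} (hnd : comp.keys.Nodup)
    (ri rj : List Int) : (pvBMerge comp ri rj).keys = comp.keys := by
  rw [pvBMerge, PySem.Dict.items_eq_map_keys comp hnd [], List.foldl_map]
  have : ∀ (l : List (List Int)) (d : PySem.Dict (List Int) (List Int)),
      l.Nodup → (∀ x ∈ l, x ∉ d.keys) →
      (l.foldl (fun e x => e.insert x (if comp.getD x [] = rj then ri else comp.getD x [])) d).keys
        = d.keys ++ l := by
    intro l
    induction l with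
    | nil => intro d _ _; simp
    | cons x t ih =>
      intro d hnd2 hfresh
      simp only [List.foldl_cons]
      rw [ih _ (List.nodup_cons.mp hnd2).2 ?_, PySem.Dict.keys_insert_of_not_contains]
      · simp
      · rw [PySem.Dict.contains_eq_decide_mem_keys]
        simp [hfresh x (by simp)]
      · intro z hz
        rw [PySem.Dict.mem_keys_insert]
        rintro (rfl | hm)
        · exact (List.nodup_cons.mp hnd2).1 hz
        · exact hfresh z (by simp [hz]) hm
  simpa using this comp.keys PySem.Dict.empty hnd (by simp [PySem.Dict.keys_empty])

theorem pvLoop_sim (S vs : List (List Int)) (hmem : ∀ x, x ∈ S ↔ x ∈ vs) (hvs : vs.Nodup) :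
    ∀ (es : List (Int × List Int × List Int)) (w : Int)
      (dA : PySem.Dict (List Int) (Option (List Int))) (comp : PySem.Dict (List Int) (List Int)),
      PvGood dA → dA.keys = S → comp.keys = vs →
      (∀ x ∈ S, ∃ r, PvRoot dA x r ∧ comp.getD x [] = r) →
      (∀ t ∈ es, t.2.1 ∈ S ∧ t.2.2 ∈ S) →
      (es.foldl (fun (st : Int × PySem.Dict (List Int) (Option (List Int))) t =>
          let u := pvUnify st.2 t.2.1 t.2.2
          (if u.1 then st.1 + t.1 else st.1, u.2)) (w, dA)).1 =
      (es.foldl pvBStep (w, comp)).1 := by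
  intro es
  induction es with
  | nil => intro w dA comp _ _ _ _ _; rfl
  | cons t ts ih =>
    intro w dA comp hg hSk hck hinv hes
    obtain ⟨hi, hj⟩ := hes t (by simp)
    obtain ⟨ri, hroot_i, hcomp_i⟩ := hinv t.2.1 hi
    obtain ⟨rj, hroot_j, hcomp_j⟩ := hinv t.2.2 hj
    have hik : t.2.1 ∈ dA.keys := by rw [hSk]; exact hi
    have hjk : t.2.2 ∈ dA.keys := by rw [hSk]; exact hj
    obtain ⟨hu1, hug, hukeys, hupres⟩ := pvUnify_spec hg hik hjk hroot_i hroot_j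
    have hstepB : pvBStep (w, comp) t =
        if ri ≠ rj then (w + t.1, pvBMerge comp ri rj) else (w, comp) := by
      rw [pvBStep]
      simp only [hcomp_i, hcomp_j]
    simp only [List.foldl_cons, hu1, hstepB]
    by_cases hc : ri = rj
    · subst hc
      simp only [ne_eq, not_true_eq_false, decide_false, if_neg (Bool.false_ne_true)]
      apply ih w (pvUnify dA t.2.1 t.2.2).2 comp hug (hukeys.trans hSk) hck ?_
        (fun e he => hes e (by simp [he]))
      intro x hx
      obtain ⟨r, hr, hcr⟩ := hinv x hx
      refine ⟨r, ?_, hcr⟩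
      have := hupres x r hr
      simpa using this
    · have hdec : (decide (ri ≠ rj)) = true := by simp [hc]
      simp only [hdec, if_pos rfl, ne_eq, hc, not_false_eq_true, if_pos]
      apply ih (w + t.1) (pvUnify dA t.2.1 t.2.2).2 (pvBMerge comp ri rj) hug
        (hukeys.trans hSk) ((pvBMerge_keys (hck ▸ hvs) ri rj).trans hck) ?_
        (fun e he => hes e (by simp [he]))
      intro x hx
      obtain ⟨r, hr, hcr⟩ := hinv x hx
      refine ⟨if r = rj then ri else r, ?_, ?_⟩
      · have := hupres x r hr
        simpa [hc] using this
      · rw [PySem.Dict.getD_eq_get?_getD, pvBMerge_get? (hck ▸ hvs) ri rj x,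
          if_pos (by rw [hck]; exact (hmem x).mp hx), hcr]
        simp

theorem pvDedup_append_singleton {κ : Type} [BEq κ] [LawfulBEq κ] [DecidableEq κ]
    (m : List κ) (x : κ) :
    PySem.List.dedup (m ++ [x]) =
      if x ∈ m then PySem.List.dedup m else PySem.List.dedup m ++ [x] := by
  simp only [PySem.List.dedup_eq_ofList, PySem.Set.ofList_eq_foldl, List.foldl_append,
    List.foldl_cons, List.foldl_nil]
  rw [show ∀ s : PySem.Set κ, PySem.Set.add s x = if PySem.Set.contains s x then s else s ++ [x]
      from fun s => rfl]
  by_cases hx : x ∈ m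
  · rw [if_pos ?_, if_pos hx]
    rw [show PySem.Set.contains (List.foldl PySem.Set.add [] m) x = ((List.foldl PySem.Set.add [] m).contains x) from rfl]
    have : x ∈ List.foldl PySem.Set.add [] m := by
      rw [← PySem.Set.ofList_eq_foldl]
      exact (PySem.Set.mem_ofList _ _).mpr hx
    simpa using this
  · rw [if_neg ?_, if_neg hx]
    have : x ∉ List.foldl PySem.Set.add [] m := by
      rw [← PySem.Set.ofList_eq_foldl]
      intro h; exact hx ((PySem.Set.mem_ofList _ _).mp h)
    simpa using this

theorem pvDict_foldl_insertf {κ ν : Type} [BEq κ] [LawfulBEq κ] [DecidableEq κ] (f : κ → ν) :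
    ∀ (l m : List κ),
      l.foldl (fun d k => d.insert k (f k))
          (PySem.Dict.mk ((PySem.List.dedup m).map (fun k => (k, f k)))) =
        PySem.Dict.mk ((PySem.List.dedup (m ++ l)).map (fun k => (k, f k))) := by
  intro l
  induction l with
  | nil => intro m; simp
  | cons x t ih =>
    intro m
    have hstep : (PySem.Dict.mk ((PySem.List.dedup m).map (fun k => (k, f k)))).insert x (f x) =
        PySem.Dict.mk ((PySem.List.dedup (m ++ [x])).map (fun k => (k, f k))) := by
      apply PySem.Dict.ext
      rw [pvDedup_append_singleton]
      by_cases hx : x ∈ m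
      · rw [PySem.Dict.items_insert_of_contains, if_pos hx]
        · show ((PySem.List.dedup m).map (fun k => (k, f k))).map
              (fun p => if p.1 == x then (x, f x) else p) = (PySem.List.dedup m).map (fun k => (k, f k))
          rw [List.map_map]
          apply List.map_congr_left
          intro k _
          by_cases hk : k = x
          · subst hk; simp
          · simp [hk]
        · have : x ∈ PySem.List.dedup m := (PySem.List.mem_dedup _ _).mpr hx
          rw [PySem.Dict.contains_eq_decide_mem_keys]
          simp only [PySem.Dict.keys_mk, List.map_map]
          simp [List.mem_map]
          exact hx
      · rw [PySem.Dict.items_insert_of_not_contains, if_neg hx]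
        · simp
        · have : x ∉ PySem.List.dedup m := fun h => hx ((PySem.List.mem_dedup _ _).mp h)
          rw [PySem.Dict.contains_eq_decide_mem_keys]
          simp only [PySem.Dict.keys_mk, List.map_map]
          simp [List.mem_map]
          exact hx
    simp only [List.foldl_cons, hstep, ih (m ++ [x]), List.append_assoc, List.singleton_append]

theorem pvKey3_inj : Function.Injective pvKey3 := by
  intro a b h
  simp only [pvKey3, List.cons.injEq, and_true] at h
  exact Prod.ext h.1 (Prod.ext h.2.1 h.2.2)

theorem pvGetD_cast (vs : List (List Int)) (a : Nat) (ha : a < vs.length) :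
    PySem.List.pyGetD vs (a : Int) [] = vs[a] := by
  rw [PySem.List.pyGetD_natCast, List.getD_eq_getElem vs [] ha]

theorem pvTB_mem (vs : List (List Int)) (t : Int × List Int × List Int) :
    t ∈ pvTB vs ↔ ∃ (a b : Nat) (_ha : a < vs.length) (_hb : b < vs.length),
      a < b ∧ t = (pvBDist vs[a] vs[b], vs[a], vs[b]) := by
  simp only [pvTB, List.mem_flatMap, List.mem_map, PySem.List.mem_pyRange_one]
  constructor
  · rintro ⟨x, ⟨hx0, hxn⟩, y, ⟨hy1, hyn⟩, rfl⟩
    have hy0 : (0 : Int) ≤ y := by omega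
    refine ⟨x.toNat, y.toNat, by omega, by omega, by omega, ?_⟩
    rw [← pvGetD_cast vs x.toNat (by omega), ← pvGetD_cast vs y.toNat (by omega),
      Int.toNat_of_nonneg hx0, Int.toNat_of_nonneg hy0]
  · rintro ⟨a, b, ha, hb, hab, rfl⟩
    refine ⟨(a : Int), ⟨by omega, by omega⟩, (b : Int), ⟨by omega, by omega⟩, ?_⟩
    rw [pvGetD_cast vs a ha, pvGetD_cast vs b hb]

theorem pvTB_nodup (vs : List (List Int)) (h : vs.Nodup) : (pvTB vs).Nodup := by
  have hinj : ∀ (x y : Int), 0 ≤ x → x < vs.length → 0 ≤ y → y < vs.length →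
      PySem.List.pyGetD vs x [] = PySem.List.pyGetD vs y [] → x = y := by
    intro x y hx0 hxn hy0 hyn he
    rw [show x = ((x.toNat : Nat) : Int) from by omega, show y = ((y.toNat : Nat) : Int) from by omega] at he
    rw [pvGetD_cast vs x.toNat (by omega), pvGetD_cast vs y.toNat (by omega)] at he
    have := (h.getElem_inj_iff).mp (by simpa using he)
    omega
  rw [pvTB, List.nodup_flatMap]
  constructor
  · intro x hx
    rw [PySem.List.mem_pyRange_one] at hx
    apply List.Nodup.map_on ?_ (PySem.List.nodup_pyRange_one _ _)
    intro y hy y' hy' he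
    rw [PySem.List.mem_pyRange_one] at hy hy'
    have he2 := congrArg (fun t : Int × List Int × List Int => t.2.2) he
    simp only at he2
    have := hinj y y' (by omega) (by omega) (by omega) (by omega) he2
    omega
  · rw [List.pairwise_iff_getElem]
    intro i j hi hj hij
    simp only [Function.onFun]
    intro t ht1 ht2
    simp only [List.mem_map] at ht1 ht2
    obtain ⟨y1, hy1, rfl⟩ := ht1
    obtain ⟨y2, hy2, he⟩ := ht2
    have hx1 := (PySem.List.mem_pyRange_one).mp (List.getElem_mem hi)
    have hx2 := (PySem.List.mem_pyRange_one).mp (List.getElem_mem hj)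
    have hlt : (PySem.List.pyRange 0 (vs.length : Int))[i] < (PySem.List.pyRange 0 (vs.length : Int))[j] := by
      have := (List.pairwise_iff_getElem.mp (PySem.List.pairwise_lt_pyRange_one 0 (vs.length : Int))) i j hi hj hij
      exact this
    have he2 := congrArg (fun t : Int × List Int × List Int => t.2.1) he
    simp only at he2
    have := hinj _ _ (by omega) (by omega) (by omega) (by omega) he2
    omega

theorem pvTA_eq (goals : List (List Int)) :
    (pvDistances goals).items.map (fun kv => (kv.2, kv.1.1, kv.1.2)) =
      (PySem.List.dedup (pvCross goals)).map (fun p => (pvDISTANCE p.1 p.2, p.1, p.2)) := by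
  have h := pvDict_foldl_insertf (fun p : List Int × List Int => pvDISTANCE p.1 p.2) (pvCross goals) []
  have hempty : (PySem.Dict.empty : PySem.Dict (List Int × List Int) Int) =
      PySem.Dict.mk ((PySem.List.dedup ([] : List (List Int × List Int))).map
        (fun k => (k, pvDISTANCE k.1 k.2))) := rfl
  rw [pvDistances, hempty, h]
  simp [List.map_map, Function.comp_def]

theorem pvTA_mem (goals : List (List Int)) (t : Int × List Int × List Int) :
    t ∈ (PySem.List.dedup (pvCross goals)).map (fun p => (pvDISTANCE p.1 p.2, p.1, p.2)) ↔
      ∃ i j, i ∈ goals ∧ j ∈ goals ∧ i < j ∧ t = (pvDISTANCE i j, i, j) := by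
  simp only [List.mem_map, PySem.List.mem_dedup, pvCross, List.mem_flatMap, List.mem_filter,
    List.mem_map, decide_eq_true_eq]
  constructor
  · rintro ⟨p, ⟨i, hi, j, ⟨hj, hij⟩, rfl⟩, rfl⟩
    exact ⟨i, j, hi, hj, hij, rfl⟩
  · rintro ⟨i, j, hi, hj, hij, rfl⟩
    exact ⟨(i, j), ⟨i, hi, j, ⟨hj, hij⟩, rfl⟩, rfl⟩

theorem pvTA_nodup (goals : List (List Int)) :
    ((PySem.List.dedup (pvCross goals)).map (fun p => (pvDISTANCE p.1 p.2, p.1, p.2))).Nodup := by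
  apply List.Nodup.map_on ?_ (PySem.List.nodup_dedup _)
  intro p _ q _ he
  have h1 := congrArg (fun t : Int × List Int × List Int => t.2.1) he
  have h2 := congrArg (fun t : Int × List Int × List Int => t.2.2) he
  simp only at h1 h2
  exact Prod.ext h1 h2

theorem pvSortedV_inst (l : List (List Int)) :
    PySem.List.sorted l (fun x => x) =
      @PySem.List.sorted _ _ List.instLinearOrder.toLT LinearOrder.toDecidableLT l (fun x => x) false := by
  congr 1

theorem pvSorted3_inst (xs : List (Int × List Int × List Int)) :
    PySem.List.sorted xs pvKey3 =
      @PySem.List.sorted _ _ List.instLinearOrder.toLT LinearOrder.toDecidableLT xs pvKey3 false := by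
  congr 1

theorem pvEdges_eq (goals : List (List Int)) :
    PySem.List.sorted ((pvDistances goals).items.map (fun kv => (kv.2, kv.1.1, kv.1.2))) pvKey3 =
      PySem.List.sorted (pvTB (PySem.List.sorted (PySem.Set.ofList goals) (fun x => x))) pvKey3 := by
  set vs := PySem.List.sorted (PySem.Set.ofList goals) (fun x => x) with hvs
  have hvsnd : vs.Nodup :=
    ((PySem.List.sorted_perm _ _ _).nodup_iff).mpr (PySem.Set.nodup_ofList goals)
  have hvsmem : ∀ x, x ∈ vs ↔ x ∈ goals := by
    intro x
    rw [hvs, PySem.List.mem_sorted, PySem.Set.mem_ofList]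
  have hsorted : vs.Pairwise (· < ·) := by
    rw [hvs, pvSortedV_inst]; exact PySem.List.sorted_ofList_pairwise_lt goals
  rw [pvTA_eq, pvSorted3_inst, pvSorted3_inst]
  apply PySem.List.sorted_eq_sorted_of_perm _ _ pvKey3 pvKey3_inj
  rw [List.perm_ext_iff_of_nodup (pvTA_nodup goals) (pvTB_nodup vs hvsnd)]
  intro t
  rw [pvTA_mem, pvTB_mem]
  constructor
  · rintro ⟨i, j, hi, hj, hij, rfl⟩
    obtain ⟨a, ha, hva⟩ := List.getElem_of_mem ((hvsmem i).mpr hi)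
    obtain ⟨b, hb, hvb⟩ := List.getElem_of_mem ((hvsmem j).mpr hj)
    have hab : a < b := by
      rcases Nat.lt_trichotomy a b with h | h | h
      · exact h
      · exfalso; subst h; rw [hva] at hvb; subst hvb; exact lt_irrefl _ hij
      · exfalso
        have := List.pairwise_iff_getElem.mp hsorted b a hb ha h
        rw [hva, hvb] at this
        exact lt_asymm hij this
    exact ⟨a, b, ha, hb, hab, by rw [hva, hvb]; rfl⟩
  · rintro ⟨a, b, ha, hb, hab, rfl⟩
    have hlt : vs[a] < vs[b] := List.pairwise_iff_getElem.mp hsorted a b ha hb hab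
    exact ⟨vs[a], vs[b], (hvsmem _).mp (List.getElem_mem ha), (hvsmem _).mp (List.getElem_mem hb), hlt, by rfl⟩

theorem pvDis_eq (cur : List Int) (goals : List (List Int)) :
    goals.foldl (fun dis g => if pvHSingle g cur < dis then pvHSingle g cur else dis) 99999 =
      (PySem.List.min? ((99999 : Int) :: goals.map (fun g => pvBDist g cur)) (fun x => x)).getD 99999 := by
  rw [PySem.List.min?_id_cons]
  have hf : (fun (dis : Int) (g : List Int) => if pvHSingle g cur < dis then pvHSingle g cur else dis)
      = fun (dis : Int) (g : List Int) => min dis (pvBDist g cur) := by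
    funext a g
    have : pvHSingle g cur = pvBDist g cur := rfl
    rw [this, min_def]
    split_ifs <;> omega
  rw [hf, ← List.foldl_map]
  simp

theorem pvOfList_nodup_self (l : List (List Int)) (h : l.Nodup) : PySem.Set.ofList l = l :=
  PySem.Set.ofList_eq_self_of_nodup l h

theorem pvSet_update_nil_eq_ofList (l : List (List Int)) :
    PySem.Set.update ([] : PySem.Set (List Int)) l = PySem.Set.ofList l := by
  rw [PySem.Set.ofList_eq_foldl]; rfl

theorem pvWeight_eq (goals : List (List Int)) :
    pvMstWeight goals =
      ((PySem.List.sorted (pvTB (PySem.List.sorted (PySem.Set.ofList goals) (fun x => x))) pvKey3).foldl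
        pvBStep
        (0, (PySem.List.sorted (PySem.Set.ofList goals) (fun x => x)).foldl
          (fun d v => d.insert v v) PySem.Dict.empty)).1 := by
  set vs := PySem.List.sorted (PySem.Set.ofList goals) (fun x => x) with hvs
  have hvsnd : vs.Nodup :=
    ((PySem.List.sorted_perm _ _ _).nodup_iff).mpr (PySem.Set.nodup_ofList goals)
  have hvsmem : ∀ x, x ∈ vs ↔ x ∈ goals := by
    intro x
    rw [hvs, PySem.List.mem_sorted, PySem.Set.mem_ofList]
  set S : List (List Int) := PySem.Set.ofList goals with hS
  have hSmem : ∀ x, x ∈ S ↔ x ∈ goals := fun x => PySem.Set.mem_ofList goals x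
  have hkeys0 : (pvElems0 goals).keys = S := by
    rw [pvElems0, PySem.Dict.keys_foldl_insert, PySem.Dict.keys_empty,
      pvSet_update_nil_eq_ofList]
  have hget0 : ∀ y, (pvElems0 goals).get? y = if y ∈ goals then some none else none := by
    intro y
    rw [pvElems0]
    have := pvGet_foldl_insertf (fun _ : List Int => (none : Option (List Int))) goals
      PySem.Dict.empty y
    simpa [PySem.Dict.get?_empty] using this
  have hgood0 : PvGood (pvElems0 goals) := by
    intro k hk
    rw [hkeys0] at hk
    exact ⟨[], PvChain.root (by rw [hget0 k, if_pos ((hSmem k).mp hk)])⟩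
  set comp0 := vs.foldl (fun (d : PySem.Dict (List Int) (List Int)) v => d.insert v v)
    PySem.Dict.empty with hcomp0
  have hcompkeys : comp0.keys = vs := by
    rw [hcomp0, PySem.Dict.keys_foldl_insert, PySem.Dict.keys_empty,
      pvSet_update_nil_eq_ofList]
    exact pvOfList_nodup_self vs hvsnd
  have hcompget : ∀ y ∈ vs, comp0.get? y = some y := by
    intro y hy
    rw [hcomp0]
    have := pvGet_foldl_insertf (fun v : List Int => v) vs PySem.Dict.empty y
    simpa [hy] using this
  rw [pvMstWeight, pvEdges_eq]
  apply pvLoop_sim S vs (fun x => (hSmem x).trans (hvsmem x).symm) hvsnd _ 0 (pvElems0 goals) comp0 hgood0 hkeys0 hcompkeys ?_ ?_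
  · intro x hx
    refine ⟨x, ⟨[], PvChain.root (by rw [hget0 x, if_pos ((hSmem x).mp hx)]), rfl⟩, ?_⟩
    rw [PySem.Dict.getD_eq_get?_getD, hcompget x ((hvsmem x).mpr ((hSmem x).mp hx))]
    rfl
  · intro t ht
    rw [PySem.List.mem_sorted, pvTB_mem] at ht
    obtain ⟨a, b, ha, hb, hab, rfl⟩ := ht
    exact ⟨(hSmem _).mpr ((hvsmem _).mp (List.getElem_mem ha)),
      (hSmem _).mpr ((hvsmem _).mp (List.getElem_mem hb))⟩

-- ===== VERDICT (by name: the statement is the Claim_ definition above) =====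
theorem h_multiple_spec : Claim_equal_h_multiple := by
  intro current_pos remaining_goals _ _
  unfold Spec_h_multiple
  calc h_multiple current_pos remaining_goals
      = (remaining_goals.foldl
          (fun dis goal => if pvHSingle goal current_pos < dis then pvHSingle goal current_pos else dis)
          99999) + pvMstWeight remaining_goals := rfl
    _ = ((PySem.List.min? ((99999 : Int) :: remaining_goals.map (fun g => pvBDist g current_pos))
            (fun x => x)).getD 99999) +
        ((PySem.List.sorted (pvTB (PySem.List.sorted (PySem.Set.ofList remaining_goals) (fun x => x))) pvKey3).foldl
          pvBStep
          (0, (PySem.List.sorted (PySem.Set.ofList remaining_goals) (fun x => x)).foldl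
            (fun d v => d.insert v v) PySem.Dict.empty)).1 := by
        rw [pvDis_eq, pvWeight_eq]
    _ = h_multiple_alt current_pos remaining_goals := rfl
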